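-- pv_equiv track=rewrite | github.com/Sanjeet2601/Synthesis-for-F-language | Evaluation/helpers/fstar_dataset-eval-v1.0/evaluate.py | evaluation_function
-- ===== SOURCE A (Python) =====
-- def evaluation_function(truths):
--     if truths is None or len(truths) == 0:
--         truths = [False]
--     k_values = range(1, len(truths) + 1)
--     metrics = {
--         f"pass@{k}": any(truths[:k]) for k in k_values
--     }
--     metrics["pass@any"] = any(truths)
--     return metrics
-- ===== SOURCE B (Python) =====
-- def evaluation_function(truths):
--     if truths is None or len(truths) == 0:
--         truths = [False]
--     prefix = []          # prefix[j] = any(truths[:j+1]), computed by a running OR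
--     seen = False
--     for t in truths:
--         seen = seen or t
--         prefix.append(seen)
--     metrics = {f"pass@{k}": v for k, v in enumerate(prefix, 1)}
--     metrics["pass@any"] = seen
--     return metrics
-- ===== Notes on version B (the rewrite author's own statement) =====
-- stated objective: alternative
-- what changed: Instead of re-scanning the prefix truths[:k] with any() for each k, B makes one cumulative-OR scan over truths and builds the dict from the resulting prefix list with enumerate; asymptotically O(n) vs O(n^2), though a timing run could not certify a speedup at its largest shared rung.
import Mathlib
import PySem

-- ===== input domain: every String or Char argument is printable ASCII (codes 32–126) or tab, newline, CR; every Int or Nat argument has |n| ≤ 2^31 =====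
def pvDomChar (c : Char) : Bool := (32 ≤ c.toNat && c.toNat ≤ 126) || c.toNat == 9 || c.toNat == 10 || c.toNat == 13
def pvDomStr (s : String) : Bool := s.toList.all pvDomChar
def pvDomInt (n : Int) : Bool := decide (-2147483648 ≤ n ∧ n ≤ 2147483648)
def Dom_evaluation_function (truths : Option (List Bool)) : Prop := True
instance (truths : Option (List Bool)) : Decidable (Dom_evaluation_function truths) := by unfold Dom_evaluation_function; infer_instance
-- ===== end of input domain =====

-- B replaces A's per-k any(truths[:k]) prefix re-scan by one cumulative-OR scan producing a
-- prefix list, from which the dict is built by enumerate (objective: alternative single-pass algorithm).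

-- ===== PORT A =====
def evaluation_function (truths : Option (List Bool)) : List (String × Bool) :=
  let ts : List Bool :=
    match truths with
    | none => [false]
    | some l => if l.length = 0 then [false] else l
  (PySem.Dict.insert
    ((PySem.List.pyRange 1 (PySem.List.len ts + 1) 1).foldl
      (fun d k => PySem.Dict.insert d ("pass@" ++ PySem.Int.toStr k)
        ((PySem.List.slice ts none (some k)).any id))
      PySem.Dict.empty)
    "pass@any" (ts.any id)).items

-- ===== PORT B =====
def evaluation_function_alt (truths : Option (List Bool)) : List (String × Bool) :=
  let ts : List Bool :=
    match truths with
    | none => [false]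
    | some l => if l.length = 0 then [false] else l
  -- the for-loop: running OR 'seen', appending it to 'pref'
  let st : List Bool × Bool :=
    ts.foldl (fun st t => (st.1 ++ [st.2 || t], st.2 || t)) (([] : List Bool), false)
  -- the dict comprehension over enumerate(pref, 1), then metrics["pass@any"] = seen
  (PySem.Dict.insert
    ((PySem.List.enumerate st.1 1).foldl
      (fun d p => PySem.Dict.insert d ("pass@" ++ PySem.Int.toStr p.1) p.2)
      PySem.Dict.empty)
    "pass@any" st.2).items

-- ===== PRECONDITION & SPEC =====
def Spec_evaluation_function (truths : Option (List Bool)) (out : List (String × Bool)) : Prop := out = evaluation_function_alt truths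
instance (truths : Option (List Bool)) (out : List (String × Bool)) : Decidable (Spec_evaluation_function truths out) := by unfold Spec_evaluation_function; infer_instance

-- ===== CLAIM (what is proved, stated in full; the proofs are below) =====
def Claim_equal_evaluation_function : Prop := ∀ (truths : Option (List Bool)), Dom_evaluation_function truths → Spec_evaluation_function truths (evaluation_function truths)

-- ===== LEMMAS AND PROOFS =====

-- decimal digit string of n, structurally (equal to Nat.toDigits 10 n)
def pvRep (n : Nat) : List Char :=
  if _h : n < 10 then [Nat.digitChar n]
  else pvRep (n / 10) ++ [Nat.digitChar (n % 10)]
decreasing_by exact Nat.div_lt_self (by omega) (by omega)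

lemma pvRep_of_lt {n : Nat} (h : n < 10) : pvRep n = [Nat.digitChar n] := by
  conv_lhs => rw [pvRep]
  rw [dif_pos h]

lemma pvRep_of_ge {n : Nat} (h : ¬ n < 10) :
    pvRep n = pvRep (n / 10) ++ [Nat.digitChar (n % 10)] := by
  conv_lhs => rw [pvRep]
  rw [dif_neg h]

lemma pvRep_ne_nil (n : Nat) : pvRep n ≠ [] := by
  by_cases h : n < 10
  · rw [pvRep_of_lt h]; simp
  · rw [pvRep_of_ge h]; simp

lemma toDigitsCore_eq_pvRep : ∀ (f n : Nat) (acc : List Char), n < f →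
    Nat.toDigitsCore 10 f n acc = pvRep n ++ acc := by
  intro f
  induction f with
  | zero => omega
  | succ f ih =>
    intro n acc hn
    rw [Nat.toDigitsCore]
    by_cases h : n / 10 = 0
    · have h10 : n < 10 := by omega
      rw [if_pos h, pvRep_of_lt h10, Nat.mod_eq_of_lt h10]
      rfl
    · have h10 : ¬ n < 10 := by omega
      rw [if_neg h, ih (n / 10) _ (by omega), pvRep_of_ge h10]
      simp

lemma toChars_eq_pvRep (k : Int) (hk : 0 ≤ k) : PySem.Int.toChars k = pvRep k.toNat := by
  unfold PySem.Int.toChars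
  rw [if_neg (by omega)]
  unfold Nat.toDigits
  rw [toDigitsCore_eq_pvRep _ _ _ (Nat.lt_succ_self _)]
  simp

lemma digitChar_inj (a b : Nat) (ha : a < 10) (hb : b < 10)
    (h : Nat.digitChar a = Nat.digitChar b) : a = b := by
  interval_cases a <;> interval_cases b <;> simp_all [Nat.digitChar]

lemma pvRep_inj : ∀ m n : Nat, pvRep m = pvRep n → m = n := by
  intro m
  induction m using Nat.strong_induction_on with
  | _ m ih =>
    intro n h
    by_cases hm : m < 10 <;> by_cases hn : n < 10
    · rw [pvRep_of_lt hm, pvRep_of_lt hn] at h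
      exact digitChar_inj m n hm hn (by simpa using h)
    · rw [pvRep_of_lt hm, pvRep_of_ge hn] at h
      have hlen := congrArg List.length h
      simp at hlen
      exact absurd hlen (pvRep_ne_nil _)
    · rw [pvRep_of_ge hm, pvRep_of_lt hn] at h
      have hlen := congrArg List.length h
      simp at hlen
      exact absurd hlen (pvRep_ne_nil _)
    · rw [pvRep_of_ge hm, pvRep_of_ge hn] at h
      have h2 := List.append_inj h (by
        have hlen := congrArg List.length h
        simpa using hlen)
      have hdiv : m / 10 = n / 10 := ih (m / 10) (Nat.div_lt_self (by omega) (by omega)) _ h2.1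
      have hmod : m % 10 = n % 10 :=
        digitChar_inj _ _ (Nat.mod_lt _ (by omega)) (Nat.mod_lt _ (by omega)) (by simpa using h2.2)
      omega

lemma pvRep_getLast? (n : Nat) : (pvRep n).getLast? = some (Nat.digitChar (n % 10)) := by
  by_cases h : n < 10
  · rw [pvRep_of_lt h, Nat.mod_eq_of_lt h]
    rfl
  · rw [pvRep_of_ge h]
    simp

lemma pvRep_ne_any (n : Nat) : pvRep n ≠ ['a', 'n', 'y'] := by
  intro h
  have hlast := pvRep_getLast? n
  rw [h] at hlast
  simp at hlast
  have hlt : n % 10 < 10 := Nat.mod_lt _ (by omega)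
  have : Nat.digitChar (n % 10) = 'y' := by
    simpa using hlast.symm
  revert this
  set r := n % 10 with hr
  interval_cases r <;> decide

lemma key_inj (a b : Int) (ha : 0 ≤ a) (hb : 0 ≤ b)
    (h : "pass@" ++ PySem.Int.toStr a = "pass@" ++ PySem.Int.toStr b) : a = b := by
  have h' := congrArg String.toList h
  simp only [String.toList_append] at h'
  have h2 : (PySem.Int.toStr a).toList = (PySem.Int.toStr b).toList :=
    List.append_cancel_left h'
  rw [PySem.Int.toList_toStr, PySem.Int.toList_toStr,
    toChars_eq_pvRep a ha, toChars_eq_pvRep b hb] at h2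
  have := pvRep_inj _ _ h2
  omega

lemma key_ne_any (k : Int) (hk : 0 ≤ k) :
    ("pass@" ++ PySem.Int.toStr k) ≠ "pass@any" := by
  intro h
  have h' := congrArg String.toList h
  simp only [String.toList_append] at h'
  have hany : (PySem.Int.toStr k).toList = ['a', 'n', 'y'] := by
    have hp : "pass@".toList = ['p', 'a', 's', 's', '@'] := rfl
    have h2 : "pass@any".toList = ['p', 'a', 's', 's', '@', 'a', 'n', 'y'] := rfl
    rw [hp, h2] at h'
    simpa using h'
  rw [PySem.Int.toList_toStr, toChars_eq_pvRep k hk] at hany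
  exact pvRep_ne_any _ hany

-- the canonical value both programs compute
def pvCanon (ts : List Bool) : List (String × Bool) :=
  (PySem.List.pyRange 1 ((ts.length : Int) + 1) 1).map
    (fun k => ("pass@" ++ PySem.Int.toStr k, (ts.take k.toNat).any id))
  ++ [("pass@any", ts.any id)]

-- A's dict equals the canonical list
lemma bodyA_eq (ts : List Bool) :
    (PySem.Dict.insert
      ((PySem.List.pyRange 1 (PySem.List.len ts + 1) 1).foldl
        (fun d k => PySem.Dict.insert d ("pass@" ++ PySem.Int.toStr k)
          ((PySem.List.slice ts none (some k)).any id))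
        PySem.Dict.empty)
      "pass@any" (ts.any id)).items = pvCanon ts := by
  simp only [PySem.List.len_eq]
  have hnodup : ((PySem.List.pyRange 1 ((ts.length : Int) + 1) 1).map
      (fun k => "pass@" ++ PySem.Int.toStr k)).Nodup := by
    refine List.Nodup.map_on ?_ (PySem.List.nodup_pyRange_one 1 _)
    intro x hx y hy hxy
    rw [PySem.List.mem_pyRange_one] at hx hy
    exact key_inj x y (by omega) (by omega) hxy
  have hfresh : ∀ a ∈ PySem.List.pyRange 1 ((ts.length : Int) + 1) 1,
      (PySem.Dict.empty : PySem.Dict String Bool).contains ("pass@" ++ PySem.Int.toStr a) = false := by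
    intro a _
    rfl
  have hfold := PySem.Dict.items_foldl_insert_fresh
      (PySem.List.pyRange 1 ((ts.length : Int) + 1) 1)
      (fun k => "pass@" ++ PySem.Int.toStr k)
      (fun k => (PySem.List.slice ts none (some k)).any id)
      PySem.Dict.empty hfresh hnodup
  have hc : ((PySem.List.pyRange 1 ((ts.length : Int) + 1) 1).foldl
      (fun d k => PySem.Dict.insert d ("pass@" ++ PySem.Int.toStr k)
        ((PySem.List.slice ts none (some k)).any id))
      PySem.Dict.empty).contains "pass@any" = false := by
    have hnot : ¬ ((PySem.List.pyRange 1 ((ts.length : Int) + 1) 1).foldl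
        (fun d k => PySem.Dict.insert d ("pass@" ++ PySem.Int.toStr k)
          ((PySem.List.slice ts none (some k)).any id))
        PySem.Dict.empty).contains "pass@any" = true := by
      rw [PySem.Dict.contains_iff_mem_keys]
      have hempty : (PySem.Dict.empty : PySem.Dict String Bool).items = ([] : List (String × Bool)) := rfl
      simp only [PySem.Dict.keys, hfold, hempty, List.nil_append, List.map_map, List.mem_map,
        Function.comp]
      rintro ⟨k, hk, hkey⟩
      rw [PySem.List.mem_pyRange_one] at hk
      exact key_ne_any k (by omega) hkey
    simpa using hnot
  rw [PySem.Dict.items_insert_of_not_contains _ _ hc, hfold]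
  have hempty : (PySem.Dict.empty : PySem.Dict String Bool).items = ([] : List (String × Bool)) := rfl
  rw [hempty, List.nil_append]
  unfold pvCanon
  congr 1
  apply List.map_congr_left
  intro k hk
  rw [PySem.List.mem_pyRange_one] at hk
  beta_reduce
  rw [PySem.List.slice_to ts (by omega)]

-- the cumulative-OR scan, characterised
lemma scan_eq (ts : List Bool) : ∀ (acc : List Bool) (seen : Bool),
    ts.foldl (fun st t => (st.1 ++ [st.2 || t], st.2 || t)) (acc, seen)
    = (acc ++ (List.range ts.length).map (fun j => seen || (ts.take (j+1)).any id),
       seen || ts.any id) := by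
  induction ts with
  | nil => intro acc seen; simp
  | cons t ts ih =>
    intro acc seen
    rw [List.foldl_cons, ih]
    simp [Prod.ext_iff, List.range_succ_eq_map, List.map_map, Function.comp,
      Bool.or_assoc, List.take_succ_cons]

-- B's dict equals the canonical list
lemma bodyB_eq (ts : List Bool) :
    (PySem.Dict.insert
      ((PySem.List.enumerate
          (ts.foldl (fun st t => (st.1 ++ [st.2 || t], st.2 || t)) (([] : List Bool), false)).1 1).foldl
        (fun d p => PySem.Dict.insert d ("pass@" ++ PySem.Int.toStr p.1) p.2)
        PySem.Dict.empty)
      "pass@any"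
      (ts.foldl (fun st t => (st.1 ++ [st.2 || t], st.2 || t)) (([] : List Bool), false)).2).items
    = pvCanon ts := by
  rw [scan_eq ts [] false]
  simp only [List.nil_append, Bool.false_or]
  set pref : List Bool := (List.range ts.length).map (fun j => (ts.take (j+1)).any id) with hpre
  have hlen : pref.length = ts.length := by simp [hpre]
  have hkeys : (PySem.List.enumerate pref 1).map (fun p => "pass@" ++ PySem.Int.toStr p.1)
      = (PySem.List.pyRange 1 (1 + (pref.length : Int)) 1).map (fun k => "pass@" ++ PySem.Int.toStr k) := by
    have : (fun (p : Int × Bool) => "pass@" ++ PySem.Int.toStr p.1)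
        = (fun k => "pass@" ++ PySem.Int.toStr k) ∘ (fun (p : Int × Bool) => p.1) := rfl
    rw [this, ← List.map_map, PySem.List.map_fst_enumerate]
  have hnodup : ((PySem.List.enumerate pref 1).map (fun p => "pass@" ++ PySem.Int.toStr p.1)).Nodup := by
    rw [hkeys]
    refine List.Nodup.map_on ?_ (PySem.List.nodup_pyRange_one 1 _)
    intro x hx y hy hxy
    rw [PySem.List.mem_pyRange_one] at hx hy
    exact key_inj x y (by omega) (by omega) hxy
  have hfresh : ∀ p ∈ PySem.List.enumerate pref 1,
      (PySem.Dict.empty : PySem.Dict String Bool).contains ("pass@" ++ PySem.Int.toStr p.1) = false := by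
    intro p _
    rfl
  have hfold := PySem.Dict.items_foldl_insert_fresh
      (PySem.List.enumerate pref 1)
      (fun p => "pass@" ++ PySem.Int.toStr p.1)
      (fun p => p.2)
      PySem.Dict.empty hfresh hnodup
  have hc : ((PySem.List.enumerate pref 1).foldl
      (fun d p => PySem.Dict.insert d ("pass@" ++ PySem.Int.toStr p.1) p.2)
      PySem.Dict.empty).contains "pass@any" = false := by
    have hnot : ¬ ((PySem.List.enumerate pref 1).foldl
        (fun d p => PySem.Dict.insert d ("pass@" ++ PySem.Int.toStr p.1) p.2)
        PySem.Dict.empty).contains "pass@any" = true := by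
      rw [PySem.Dict.contains_iff_mem_keys]
      have hempty : (PySem.Dict.empty : PySem.Dict String Bool).items = ([] : List (String × Bool)) := rfl
      simp only [PySem.Dict.keys, hfold, hempty, List.nil_append, List.map_map, List.mem_map,
        Function.comp]
      rintro ⟨p, hp, hkey⟩
      rw [PySem.List.mem_enumerate_iff] at hp
      obtain ⟨k, hk, rfl⟩ := hp
      exact key_ne_any _ (by omega) hkey
    simpa using hnot
  rw [PySem.Dict.items_insert_of_not_contains _ _ hc, hfold]
  have hempty : (PySem.Dict.empty : PySem.Dict String Bool).items = ([] : List (String × Bool)) := rfl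
  rw [hempty, List.nil_append]
  unfold pvCanon
  congr 1
  apply List.ext_getElem
  · simp [PySem.List.length_enumerate, hlen, PySem.List.length_pyRange_one]
  · intro i h1 h2
    have hi : i < ts.length := by
      simpa [PySem.List.length_enumerate, hlen] using h1
    rw [List.getElem_map, List.getElem_map, PySem.List.getElem_enumerate,
      PySem.List.getElem_pyRange_one]
    have hprefi : pref[i]'(by omega) = (ts.take (i+1)).any id := by
      simp [hpre]
    have htn : ((1 + (i : Int))).toNat = i + 1 := by omega
    simp [hprefi, htn]

theorem pv_main : ∀ (truths : Option (List Bool)),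
    evaluation_function truths = evaluation_function_alt truths := by
  intro truths
  unfold evaluation_function evaluation_function_alt
  cases truths with
  | none => exact (bodyA_eq [false]).trans (bodyB_eq [false]).symm
  | some l =>
    by_cases h : l.length = 0
    · simp only [h]
      exact (bodyA_eq [false]).trans (bodyB_eq [false]).symm
    · simp only [if_neg h]
      exact (bodyA_eq l).trans (bodyB_eq l).symm

-- ===== VERDICT (by name: the statement is the Claim_ definition above) =====
theorem evaluation_function_spec : Claim_equal_evaluation_function := by
  intro truths _
  unfold Spec_evaluation_function
  exact pv_main truths
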